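-- pv_equiv track=rewrite | github.com/0xStryK3R/Scaler-DSA-Revision | python/Day-35/CW_4.py | solve
-- ===== SOURCE A (Python) =====
-- def solve(A):
--     N = len(A)
--
--     if N < 3:
--         return A
--
--     for bit_pos in range(32):
--         bit_0 = 0
--         bit_1 = 0
--         for num in A:
--             if num & (1 << bit_pos):
--                 bit_1 = bit_1 ^ num
--             else:
--                 bit_0 = bit_0 ^ num
--
--         if bit_0 + bit_1 != 0:
--             return sorted([bit_0, bit_1])
-- ===== SOURCE B (Python) =====
-- def solve(A):
--     # Parity reduction: a hash counter keeps only odd-count values, then the bit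
--     # scan runs over that reduced list, deriving the zero-bucket from the total XOR.
--     if len(A) < 3:
--         return A
--     counts = {}
--     for num in A:
--         counts[num] = counts.get(num, 0) + 1
--     odds = [x for x, c in counts.items() if c % 2 == 1]
--     total = 0
--     for x in odds:
--         total = total ^ x
--     for b in range(32):
--         ones = 0
--         for x in odds:
--             if x & (1 << b):
--                 ones = ones ^ x
--         zeros = total ^ ones
--         if zeros + ones != 0:
--             return sorted([zeros, ones])
-- ===== Notes on version B (the rewrite author's own statement) =====
-- stated objective: alternative
-- what changed: B first reduces the list with a hash counter to its odd-multiplicity distinct values (even-count values XOR-cancel), computes the total XOR once, then scans the 32 bits over that reduced list deriving the zero-bucket as total^ones, instead of A's 32 full rescans accumulating both buckets.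
-- outside the precondition, e.g. on solve([1, 1, 2, 2]): A returns None, B returns None
import Mathlib
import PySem

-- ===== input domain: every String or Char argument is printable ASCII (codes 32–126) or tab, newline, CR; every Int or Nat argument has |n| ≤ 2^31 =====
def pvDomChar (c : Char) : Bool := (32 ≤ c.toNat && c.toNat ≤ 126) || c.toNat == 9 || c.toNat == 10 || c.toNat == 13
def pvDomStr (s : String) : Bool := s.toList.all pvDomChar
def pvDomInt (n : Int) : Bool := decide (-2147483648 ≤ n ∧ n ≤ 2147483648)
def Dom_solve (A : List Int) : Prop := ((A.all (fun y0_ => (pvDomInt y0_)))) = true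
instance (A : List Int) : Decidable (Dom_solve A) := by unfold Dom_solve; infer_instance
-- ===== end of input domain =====

-- B replaces A's 32 rescans of the raw list by a hash-counter parity reduction: only the
-- odd-count values are kept, the bit scan runs over that reduced list, and the zero-bucket
-- is derived from the total XOR instead of being accumulated (objective: alternative).


-- ===== PORT A =====
-- one inner-loop step of A at bit b: XOR num into the second slot if bit b is set, else the first
def pvStepA (b : Nat) (s : Int × Int) (num : Int) : Int × Int :=
  if PySem.Int.band num ((1 : Int) <<< b) ≠ 0 then (s.1, PySem.Int.bxor s.2 num)
  else (PySem.Int.bxor s.1 num, s.2)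

-- A's outer loop over the remaining bit positions; falls off the end (Python: None) → [] (excluded by Pre_)
def pvLoopA (A : List Int) : List Nat → List Int
  | [] => []
  | b :: rest =>
    let p := A.foldl (pvStepA b) (0, 0)
    if p.1 + p.2 ≠ 0 then PySem.List.sorted [p.1, p.2] (fun x => x) false
    else pvLoopA A rest

def solve (A : List Int) : List Int :=
  if A.length < 3 then A else pvLoopA A (List.range 32)

-- ===== PORT B =====
-- B's inner XOR over the odd-count values whose bit b is set
def pvOnesStep (b : Nat) (acc : Int) (x : Int) : Int :=
  if PySem.Int.band x ((1 : Int) <<< b) ≠ 0 then PySem.Int.bxor acc x else acc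

-- B's bit scan over the reduced list; the zero-bucket is total ^ ones, not accumulated
def pvScanB (odds : List Int) (total : Int) : List Nat → List Int
  | [] => []
  | b :: rest =>
    let ones := odds.foldl (pvOnesStep b) 0
    let zeros := PySem.Int.bxor total ones
    if zeros + ones ≠ 0 then PySem.List.sorted [zeros, ones] (fun x => x) false
    else pvScanB odds total rest

def solve_alt (A : List Int) : List Int :=
  if A.length < 3 then A
  else
    let counts := A.foldl (fun d x => d.insert x (d.getD x 0 + 1)) (PySem.Dict.empty : PySem.Dict Int Int)
    let odds := (counts.items.filter (fun p => PySem.Int.mod p.2 2 == 1)).map (fun p => p.1)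
    let total := odds.foldl PySem.Int.bxor 0
    pvScanB odds total (List.range 32)

-- ===== PRECONDITION & SPEC =====
-- Pre_ excludes exactly the inputs on which A falls off its loop and returns None (not a list):
-- length ≥ 3 and every bit position has the two bucket XORs summing to zero.
def Pre_solve (A : List Int) : Prop :=
  A.length < 3 ∨ ∃ b ∈ List.range 32,
    ((A.filter (fun n => PySem.Int.band n ((1 : Int) <<< b) ≠ 0)).foldl PySem.Int.bxor 0) +
    ((A.filter (fun n => PySem.Int.band n ((1 : Int) <<< b) = 0)).foldl PySem.Int.bxor 0) ≠ 0
instance (A : List Int) : Decidable (Pre_solve A) := by unfold Pre_solve; infer_instance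

def pvWitness_solve : List Int := [1, 2, 3]

def Spec_solve (A : List Int) (out : List Int) : Prop := out = solve_alt A
instance (A : List Int) (out : List Int) : Decidable (Spec_solve A out) := by unfold Spec_solve; infer_instance

-- ===== CLAIM (what is proved, stated in full; the proofs are below) =====
def Claim_equal_solve : Prop := ∀ (A : List Int), Dom_solve A → Pre_solve A → Spec_solve A (solve A)

-- ===== LEMMAS AND PROOFS =====

-- PySem's bxor is Mathlib's Int.xor
theorem pvBxor_eq_xor (a b : Int) : PySem.Int.bxor a b = Int.xor a b := by
  unfold PySem.Int.bxor Int.xor; rcases a with a|a <;> rcases b with b|b <;> simp [Int.toNat] <;> omega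

theorem pvXor_assoc (a b c : Int) : Int.xor (Int.xor a b) c = Int.xor a (Int.xor b c) := by
  rcases a with a|a <;> rcases b with b|b <;> rcases c with c|c <;> simp [Int.xor, Nat.xor_assoc]

theorem pvBxor_assoc (a b c : Int) :
    PySem.Int.bxor (PySem.Int.bxor a b) c = PySem.Int.bxor a (PySem.Int.bxor b c) := by
  simp [pvBxor_eq_xor, pvXor_assoc]

theorem pvBxor_zero_left (a : Int) : PySem.Int.bxor 0 a = a := by
  rw [PySem.Int.bxor_comm]; exact PySem.Int.bxor_zero a

theorem pvBxor_left_comm (a b c : Int) :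
    PySem.Int.bxor a (PySem.Int.bxor b c) = PySem.Int.bxor b (PySem.Int.bxor a c) := by
  rw [← pvBxor_assoc, PySem.Int.bxor_comm a b, pvBxor_assoc]

-- the XOR of a list
def pvF (l : List Int) : Int := l.foldl PySem.Int.bxor 0

theorem pvF_acc (l : List Int) (a : Int) : l.foldl PySem.Int.bxor a = PySem.Int.bxor a (pvF l) := by
  induction l generalizing a with
  | nil => exact (PySem.Int.bxor_zero a).symm
  | cons x t ih =>
    rw [List.foldl_cons, ih]
    show _ = PySem.Int.bxor a (List.foldl PySem.Int.bxor (PySem.Int.bxor 0 x) t)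
    rw [ih, pvBxor_zero_left, pvBxor_assoc]

theorem pvF_cons (x : Int) (t : List Int) : pvF (x :: t) = PySem.Int.bxor x (pvF t) := by
  show List.foldl PySem.Int.bxor (PySem.Int.bxor 0 x) t = _
  rw [pvF_acc, pvBxor_zero_left]

theorem pvF_append_singleton (l : List Int) (x : Int) :
    pvF (l ++ [x]) = PySem.Int.bxor (pvF l) x := by
  rw [pvF, List.foldl_append]; rfl

theorem pvF_perm {l m : List Int} (h : l.Perm m) : pvF l = pvF m := by
  induction h with
  | nil => rfl
  | cons x _ ih => rw [pvF_cons, pvF_cons, ih]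
  | swap x y t => rw [pvF_cons, pvF_cons, pvF_cons, pvF_cons, pvBxor_left_comm]
  | trans _ _ ih1 ih2 => rw [ih1, ih2]

theorem pvF_cancel (x a : Int) : PySem.Int.bxor x (PySem.Int.bxor x a) = a := by
  rw [← pvBxor_assoc, PySem.Int.bxor_self, pvBxor_zero_left]

theorem pvF_erase {x : Int} {m : List Int} (hx : x ∈ m) :
    pvF (m.erase x) = PySem.Int.bxor x (pvF m) := by
  have hp : m.Perm (x :: m.erase x) := List.perm_cons_erase hx
  rw [pvF_perm hp, pvF_cons, pvF_cancel]

theorem pvF_filter_split (l : List Int) (p : Int → Bool) :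
    pvF l = PySem.Int.bxor (pvF (l.filter p)) (pvF (l.filter (fun x => !p x))) := by
  induction l with
  | nil => exact (PySem.Int.bxor_self 0).symm
  | cons x t ih =>
    by_cases hx : p x
    · simp only [pvF_cons, List.filter_cons, hx, Bool.not_true, if_pos, Bool.false_eq_true,
        ite_false]
      rw [ih, pvBxor_assoc]
    · simp only [pvF_cons, List.filter_cons, hx, Bool.not_false, Bool.false_eq_true,
        ite_false, ite_true]
      rw [ih, pvBxor_left_comm]

-- the odd-count distinct values of l, in first-occurrence order
def pvOdds (l : List Int) : List Int :=
  (PySem.Set.ofList l).filter (fun k => l.count k % 2 == 1)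

theorem pvOdds_nodup (l : List Int) : (pvOdds l).Nodup :=
  (PySem.Set.nodup_ofList l).filter _

theorem pvMem_odds {a : Int} {l : List Int} : a ∈ pvOdds l ↔ a ∈ l ∧ l.count a % 2 = 1 := by
  simp [pvOdds, List.mem_filter, PySem.Set.mem_ofList]

-- the parity reduction: the XOR of a list is the XOR of its odd-count distinct values
theorem pvF_odds (l : List Int) : pvF l = pvF (pvOdds l) := by
  induction l using List.reverseRecOn with
  | nil => rfl
  | append_singleton s x ih =>
    rw [pvF_append_singleton, ih]
    by_cases hodd : s.count x % 2 = 1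
    · have hxs : x ∈ s := List.count_pos_iff.mp (by omega : 0 < s.count x)
      have hxo : x ∈ pvOdds s := pvMem_odds.mpr ⟨hxs, hodd⟩
      have hperm : (pvOdds (s ++ [x])).Perm ((pvOdds s).erase x) := by
        rw [List.perm_ext_iff_of_nodup (pvOdds_nodup _) ((pvOdds_nodup s).erase x)]
        intro a
        rw [pvMem_odds, (pvOdds_nodup s).mem_erase_iff, pvMem_odds]
        by_cases hax : a = x
        · subst hax
          simp [List.count_append]
          omega
        · simp [List.count_append, hax, Ne.symm hax]
      rw [pvF_perm hperm, pvF_erase hxo, PySem.Int.bxor_comm]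
    · have hxo : x ∉ pvOdds s := fun h => hodd (pvMem_odds.mp h).2
      have hperm : (pvOdds (s ++ [x])).Perm (pvOdds s ++ [x]) := by
        rw [List.perm_ext_iff_of_nodup (pvOdds_nodup _)
          (List.Nodup.append (pvOdds_nodup s) (List.nodup_singleton x)
            (by intro a ha hb; rw [List.mem_singleton] at hb; subst hb; exact hxo ha))]
        intro a
        simp only [pvMem_odds, List.mem_append, List.mem_singleton]
        by_cases hax : a = x
        · subst hax
          simp [List.count_append]
          omega
        · simp [List.count_append, hax, Ne.symm hax]
      rw [pvF_perm hperm, pvF_append_singleton]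

-- the reduction commutes with any filter, up to permutation
theorem pvF_filter_odds (l : List Int) (p : Int → Bool) :
    pvF (l.filter p) = pvF ((pvOdds l).filter p) := by
  rw [pvF_odds (l.filter p)]
  refine pvF_perm ?_
  rw [List.perm_ext_iff_of_nodup (pvOdds_nodup _) ((pvOdds_nodup l).filter p)]
  intro a
  simp only [pvMem_odds, List.mem_filter]
  by_cases hpa : p a
  · simp [hpa, List.count_filter]
  · simp [hpa]

-- A's inner loop computes the two filtered XORs
theorem pvFoldA (l : List Int) (b : Nat) (s : Int × Int) :
    l.foldl (pvStepA b) s =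
      (PySem.Int.bxor s.1 (pvF (l.filter (fun x => !decide (PySem.Int.band x ((1 : Int) <<< b) ≠ 0)))),
       PySem.Int.bxor s.2 (pvF (l.filter (fun x => decide (PySem.Int.band x ((1 : Int) <<< b) ≠ 0))))) := by
  induction l generalizing s with
  | nil => simp [pvF, PySem.Int.bxor_zero]
  | cons x t ih =>
    by_cases hx : PySem.Int.band x ((1 : Int) <<< b) ≠ 0
    · simp [List.foldl_cons, pvStepA, hx, ih, pvF_cons, pvBxor_assoc]
    · simp [List.foldl_cons, pvStepA, ih, pvF_cons, pvBxor_assoc, not_not.mp hx]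

-- B's inner loop computes the filtered XOR over the reduced list
theorem pvFoldB (l : List Int) (b : Nat) (a : Int) :
    l.foldl (pvOnesStep b) a =
      PySem.Int.bxor a (pvF (l.filter (fun x => decide (PySem.Int.band x ((1 : Int) <<< b) ≠ 0)))) := by
  induction l generalizing a with
  | nil => exact (PySem.Int.bxor_zero a).symm
  | cons x t ih =>
    by_cases hx : PySem.Int.band x ((1 : Int) <<< b) ≠ 0
    · simp [List.foldl_cons, pvOnesStep, hx, ih, pvF_cons, pvBxor_assoc]
    · simp [List.foldl_cons, pvOnesStep, ih, not_not.mp hx]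

-- B's odds expression is pvOdds
theorem pvOdds_expr (A : List Int) :
    (((A.foldl (fun d x => d.insert x (d.getD x 0 + 1)) (PySem.Dict.empty : PySem.Dict Int Int)).items.filter
        (fun p => PySem.Int.mod p.2 2 == 1)).map (fun p => p.1)) = pvOdds A := by
  rw [PySem.Dict.foldl_insert_getD_add_one_eq_counter, PySem.Dict.items_counter]
  rw [List.filter_map, List.map_map]
  have hmap : ((fun (p : Int × Int) => p.1) ∘ (fun k => (k, (A.count k : Int)))) = id := rfl
  rw [hmap, List.map_id]
  refine List.filter_congr ?_
  intro k _
  show (PySem.Int.mod ((A.count k : Nat) : Int) 2 == 1) = (A.count k % 2 == 1)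
  rw [show ((2 : Int)) = ((2 : Nat) : Int) from rfl, PySem.Int.mod_natCast]
  rcases Nat.mod_two_eq_zero_or_one (A.count k) with h | h <;> simp [h]

-- the two scans agree
theorem pvScan_eq (A : List Int) (bits : List Nat) :
    pvLoopA A bits = pvScanB (pvOdds A) (pvF A) bits := by
  induction bits with
  | nil => rfl
  | cons b rest ih =>
    simp only [pvLoopA, pvScanB]
    have h1 := pvFoldA A b (0, 0)
    have h2 := pvFoldB (pvOdds A) b 0
    rw [pvBxor_zero_left] at h2
    rw [← pvF_filter_odds] at h2
    have h3 : PySem.Int.bxor (pvF A)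
        (pvF (A.filter (fun x => decide (PySem.Int.band x ((1 : Int) <<< b) ≠ 0)))) =
        pvF (A.filter (fun x => !decide (PySem.Int.band x ((1 : Int) <<< b) ≠ 0))) := by
      rw [pvF_filter_split A (fun x => decide (PySem.Int.band x ((1 : Int) <<< b) ≠ 0)),
        pvBxor_assoc, PySem.Int.bxor_comm
          (pvF (A.filter (fun x => !decide (PySem.Int.band x ((1 : Int) <<< b) ≠ 0)))), pvF_cancel]
    rw [h1, h2, h3]
    simp only [pvBxor_zero_left]
    split_ifs with h
    · rfl
    · exact ih

-- ===== VERDICT (by name: the statement is the Claim_ definition above) =====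
theorem solve_spec : Claim_equal_solve := by
  intro A _ _
  unfold Spec_solve solve solve_alt
  split_ifs with h
  · rfl
  · simp only [pvOdds_expr]
    have htot : (pvOdds A).foldl PySem.Int.bxor 0 = pvF A := (pvF_odds A).symm
    rw [htot]
    exact pvScan_eq A (List.range 32)
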